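-- pv_equiv track=rewrite | github.com/ambitiousmom/cautious-guacamole | recipe-bot/scorer.py | _pantry_has
-- ===== SOURCE A (Python) =====
-- from typing import List, Dict, Optional, Tuple
--
-- def _pantry_has(ingredient: str, pantry: Dict[str, bool]) -> bool:
--     """Check if an ingredient is in the pantry (fuzzy match)."""
--     ing = ingredient.lower().strip()
--     for item, in_stock in pantry.items():
--         if not in_stock:
--             continue
--         if ing in item or item in ing:
--             return True
--         # Check key word overlap
--         ing_words = set(ing.split())
--         item_words = set(item.split())
--         if any(w in item_words for w in ing_words if len(w) > 3):
--             return True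
--     return False
-- ===== SOURCE B (Python) =====
-- def _pantry_has(ingredient: str, pantry: dict) -> bool:
--     """Check if an ingredient is in the pantry (fuzzy match)."""
--     ing = ingredient.lower().strip()
--     pantry_words = set()
--     for item, in_stock in pantry.items():
--         if not in_stock:
--             continue
--         if ing in item or item in ing:
--             return True
--         pantry_words.update(item.split())
--     ing_words = {w for w in ing.split() if len(w) > 3}
--     return bool(ing_words & pantry_words)
-- ===== Notes on version B (the rewrite author's own statement) =====
-- stated objective: alternative
-- what changed: B unions all in-stock items' words into one pantry_words set during a single scan (returning early only on substring hits) and decides word overlap once at the end by intersecting it with the filtered ingredient-word set, instead of A's per-item re-splitting of the ingredient and nested per-item overlap test. (Pre_ only excludes duplicate-key association lists, which do not represent any Python dict input).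
import Mathlib
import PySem

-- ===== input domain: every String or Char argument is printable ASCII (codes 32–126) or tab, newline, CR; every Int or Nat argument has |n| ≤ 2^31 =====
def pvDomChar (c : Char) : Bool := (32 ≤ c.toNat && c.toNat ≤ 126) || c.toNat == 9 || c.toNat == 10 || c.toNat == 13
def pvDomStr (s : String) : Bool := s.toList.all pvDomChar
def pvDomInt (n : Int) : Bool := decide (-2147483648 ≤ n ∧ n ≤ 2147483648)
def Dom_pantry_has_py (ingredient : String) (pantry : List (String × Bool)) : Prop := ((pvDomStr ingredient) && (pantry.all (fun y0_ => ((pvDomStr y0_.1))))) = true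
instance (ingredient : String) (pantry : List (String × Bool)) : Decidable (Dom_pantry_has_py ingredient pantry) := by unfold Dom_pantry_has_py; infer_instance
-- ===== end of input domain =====

-- B makes one scan over the in-stock items, unioning their split words into a single
-- pantry_words set, and decides word overlap once at the end by set intersection,
-- instead of A's per-item re-splitting of the ingredient and nested overlap test.

-- ===== PORT A =====
-- the for-loop of A over pantry.items(): skip out-of-stock, substring test, per-item word overlap
def pantryLoopA (ing : List Char) : List (String × Bool) → Bool
  | [] => false
  | (item, inStock) :: rest =>
    if !inStock then pantryLoopA ing rest
    else if PySem.Chars.isIn ing item.toList || PySem.Chars.isIn item.toList ing then true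
    else
      let ingWords : PySem.Set (List Char) := PySem.Set.ofList (PySem.Chars.split₀ ing)
      let itemWords : PySem.Set (List Char) := PySem.Set.ofList (PySem.Chars.split₀ item.toList)
      if ingWords.any (fun w => decide (3 < w.length) && itemWords.contains w) then true
      else pantryLoopA ing rest

def pantry_has_py (ingredient : String) (pantry : List (String × Bool)) : Bool :=
  let ing := PySem.Chars.strip (PySem.Chars.lower ingredient.toList)
  pantryLoopA ing pantry

-- ===== PORT B =====
-- B's loop: early True (none) on a substring hit, else accumulate the item's words
def pantryScanB (ing : List Char) : List (String × Bool) → PySem.Set (List Char) → Option (PySem.Set (List Char))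
  | [], ws => some ws
  | (item, inStock) :: rest, ws =>
    if !inStock then pantryScanB ing rest ws
    else if PySem.Chars.isIn ing item.toList || PySem.Chars.isIn item.toList ing then none
    else pantryScanB ing rest (PySem.Set.update ws (PySem.Chars.split₀ item.toList))

def pantry_has_py_alt (ingredient : String) (pantry : List (String × Bool)) : Bool :=
  let ing := PySem.Chars.strip (PySem.Chars.lower ingredient.toList)
  match pantryScanB ing pantry PySem.Set.empty with
  | none => true
  | some pantryWords =>
    let ingWords : PySem.Set (List Char) :=
      PySem.Set.ofList ((PySem.Chars.split₀ ing).filter (fun w => decide (3 < w.length)))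
    !(PySem.Set.inter ingWords pantryWords).isEmpty

-- ===== PRECONDITION & SPEC =====
-- Pre_ excludes association lists with duplicate keys: they cannot arise from a Python
-- dict (a dict literal keeps only the last value per key), so the list ports' behaviour
-- there represents no dict input.
def Pre_pantry_has_py (ingredient : String) (pantry : List (String × Bool)) : Prop :=
  (pantry.map Prod.fst).Nodup
instance (ingredient : String) (pantry : List (String × Bool)) : Decidable (Pre_pantry_has_py ingredient pantry) := by unfold Pre_pantry_has_py; infer_instance

def pvWitness_pantry_has_py : String × (List (String × Bool)) :=
  ("milk", [("whole milk", true), ("eggs", false)])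

def Spec_pantry_has_py (ingredient : String) (pantry : List (String × Bool)) (out : Bool) : Prop := out = pantry_has_py_alt ingredient pantry
instance (ingredient : String) (pantry : List (String × Bool)) (out : Bool) : Decidable (Spec_pantry_has_py ingredient pantry out) := by unfold Spec_pantry_has_py; infer_instance

-- ===== CLAIM (what is proved, stated in full; the proofs are below) =====
def Claim_equal_pantry_has_py : Prop := ∀ (ingredient : String) (pantry : List (String × Bool)), Dom_pantry_has_py ingredient pantry → Pre_pantry_has_py ingredient pantry → Spec_pantry_has_py ingredient pantry (pantry_has_py ingredient pantry)

-- ===== LEMMAS AND PROOFS =====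

-- a substring hit for one item
def pvHit (ing : List Char) (item : String) : Bool :=
  PySem.Chars.isIn ing item.toList || PySem.Chars.isIn item.toList ing

-- A's per-item word-overlap test
def pvOv (ing : List Char) (item : String) : Bool :=
  (PySem.Set.ofList (PySem.Chars.split₀ ing)).any
    (fun w => decide (3 < w.length) && (PySem.Set.ofList (PySem.Chars.split₀ item.toList)).contains w)

theorem pantryLoopA_eq_any (ing : List Char) (ps : List (String × Bool)) :
    pantryLoopA ing ps = ps.any (fun p => p.2 && (pvHit ing p.1 || pvOv ing p.1)) := by
  induction ps with
  | nil => rfl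
  | cons p rest ih =>
    obtain ⟨item, st⟩ := p
    cases st with
    | false =>
      have h0 : pantryLoopA ing ((item, false) :: rest) = pantryLoopA ing rest := rfl
      rw [h0, List.any_cons, ih]; simp
    | true =>
      have h0 : pantryLoopA ing ((item, true) :: rest) =
          (if pvHit ing item = true then true
           else if pvOv ing item = true then true else pantryLoopA ing rest) := rfl
      rw [h0, List.any_cons]
      by_cases h1 : pvHit ing item = true
      · simp [h1]
      · by_cases h2 : pvOv ing item = true
        · simp [h1, h2]
        · simp [h1, h2, ih]

theorem pantryScanB_eq_none_iff (ing : List Char) (ps : List (String × Bool))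
    (ws : PySem.Set (List Char)) :
    pantryScanB ing ps ws = none ↔ ps.any (fun p => p.2 && pvHit ing p.1) = true := by
  induction ps generalizing ws with
  | nil => simp [pantryScanB]
  | cons p rest ih =>
    obtain ⟨item, st⟩ := p
    cases st with
    | false =>
      have h0 : pantryScanB ing ((item, false) :: rest) ws = pantryScanB ing rest ws := rfl
      rw [h0, List.any_cons, ih ws]; simp
    | true =>
      have h0 : pantryScanB ing ((item, true) :: rest) ws =
          (if pvHit ing item = true then none
           else pantryScanB ing rest (ws.update (PySem.Chars.split₀ item.toList))) := rfl
      rw [h0, List.any_cons]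
      by_cases h1 : pvHit ing item = true
      · simp [h1]
      · simp [h1, ih]

theorem pantryScanB_mem (ing : List Char) (ps : List (String × Bool))
    (ws ws' : PySem.Set (List Char)) (h : pantryScanB ing ps ws = some ws') (w : List Char) :
    w ∈ ws' ↔ w ∈ ws ∨ ∃ p ∈ ps, p.2 = true ∧ w ∈ PySem.Chars.split₀ p.1.toList := by
  induction ps generalizing ws with
  | nil =>
    simp only [pantryScanB, Option.some.injEq] at h
    subst h; simp
  | cons p rest ih =>
    obtain ⟨item, st⟩ := p
    cases st with
    | false =>
      have h0 : pantryScanB ing ((item, false) :: rest) ws = pantryScanB ing rest ws := rfl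
      rw [h0] at h
      rw [ih _ h]
      simp
    | true =>
      have h0 : pantryScanB ing ((item, true) :: rest) ws =
          (if pvHit ing item = true then none
           else pantryScanB ing rest (ws.update (PySem.Chars.split₀ item.toList))) := rfl
      rw [h0] at h
      by_cases h1 : pvHit ing item = true
      · rw [if_pos h1] at h; exact absurd h (by simp)
      · rw [if_neg h1] at h
        rw [ih _ h]
        simp only [PySem.Set.mem_update, List.exists_mem_cons_iff]
        tauto

theorem loop_eq_scan (ing : List Char) (pantry : List (String × Bool)) :
    pantryLoopA ing pantry =
      (match pantryScanB ing pantry PySem.Set.empty with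
       | none => true
       | some pantryWords =>
         !(PySem.Set.inter
             (PySem.Set.ofList ((PySem.Chars.split₀ ing).filter (fun w => decide (3 < w.length))))
             pantryWords).isEmpty) := by
  rw [pantryLoopA_eq_any]
  cases hscan : pantryScanB ing pantry PySem.Set.empty with
  | none =>
    rw [pantryScanB_eq_none_iff] at hscan
    rw [List.any_eq_true] at hscan
    obtain ⟨p, hp, hp2⟩ := hscan
    rw [Bool.and_eq_true] at hp2
    have : (pantry.any fun p => p.2 && (pvHit ing p.1 || pvOv ing p.1)) = true := by
      rw [List.any_eq_true]
      exact ⟨p, hp, by simp [hp2.1, hp2.2]⟩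
    simp [this]
  | some ws =>
    have hnohit : ∀ p ∈ pantry, ¬(p.2 && pvHit ing p.1) = true := by
      rw [← List.any_eq_false (l := pantry) (p := fun p => p.2 && pvHit ing p.1)]
      rw [← Bool.not_eq_true, ← pantryScanB_eq_none_iff ing pantry PySem.Set.empty, hscan]
      simp
    have hmem := pantryScanB_mem ing pantry PySem.Set.empty ws hscan
    simp only []
    rw [Bool.eq_iff_iff]
    constructor
    · intro h
      rw [List.any_eq_true] at h
      obtain ⟨p, hp, hcond⟩ := h
      simp only [Bool.and_eq_true, Bool.or_eq_true] at hcond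
      obtain ⟨hst, hhit | hov⟩ := hcond
      · exact absurd (by simp [hst, hhit] : (p.2 && pvHit ing p.1) = true) (hnohit p hp)
      · unfold pvOv at hov
        rw [List.any_eq_true] at hov
        obtain ⟨w, hw, hwc⟩ := hov
        simp only [Bool.and_eq_true, decide_eq_true_eq] at hwc
        rw [PySem.Set.mem_ofList] at hw
        have hwitem : w ∈ PySem.Chars.split₀ p.1.toList := by
          have := hwc.2
          rw [PySem.Set.contains_iff, PySem.Set.mem_ofList] at this
          exact this
        have hwin : w ∈ ws := (hmem w).mpr (Or.inr ⟨p, hp, hst, hwitem⟩)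
        have hmemi : w ∈ PySem.Set.inter
            (PySem.Set.ofList ((PySem.Chars.split₀ ing).filter (fun w => decide (3 < w.length)))) ws := by
          rw [PySem.Set.mem_inter, PySem.Set.mem_ofList, List.mem_filter]
          exact ⟨⟨hw, by simpa using hwc.1⟩, hwin⟩
        have : (PySem.Set.inter
            (PySem.Set.ofList ((PySem.Chars.split₀ ing).filter (fun w => decide (3 < w.length))))
            ws).isEmpty = false := by
          rw [List.isEmpty_eq_false_iff_exists_mem]; exact ⟨w, hmemi⟩
        simp [this]
    · intro h
      have h' : (PySem.Set.inter
          (PySem.Set.ofList ((PySem.Chars.split₀ ing).filter (fun w => decide (3 < w.length))))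
          ws).isEmpty = false := by simpa using h
      rw [List.isEmpty_eq_false_iff_exists_mem] at h'
      obtain ⟨w, hw⟩ := h'
      rw [PySem.Set.mem_inter, PySem.Set.mem_ofList, List.mem_filter] at hw
      obtain ⟨⟨hwi, hwl⟩, hws⟩ := hw
      rcases (hmem w).mp hws with hws0 | ⟨p, hp, hst, hpw⟩
      · exact absurd hws0 (List.not_mem_nil)
      · rw [List.any_eq_true]
        refine ⟨p, hp, ?_⟩
        simp only [Bool.and_eq_true, Bool.or_eq_true]
        refine ⟨hst, Or.inr ?_⟩
        unfold pvOv
        rw [List.any_eq_true]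
        refine ⟨w, by rw [PySem.Set.mem_ofList]; exact hwi, ?_⟩
        simp only [Bool.and_eq_true, decide_eq_true_eq]
        exact ⟨by simpa using hwl, by rw [PySem.Set.contains_iff, PySem.Set.mem_ofList]; exact hpw⟩

theorem pantry_equal (ingredient : String) (pantry : List (String × Bool)) :
    pantry_has_py ingredient pantry = pantry_has_py_alt ingredient pantry :=
  loop_eq_scan (PySem.Chars.strip (PySem.Chars.lower ingredient.toList)) pantry

-- ===== VERDICT (by name: the statement is the Claim_ definition above) =====
theorem pantry_has_py_spec : Claim_equal_pantry_has_py := by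
  intro ingredient pantry _ _
  unfold Spec_pantry_has_py
  exact pantry_equal ingredient pantry
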